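-- pv_equiv track=rewrite | github.com/1s0m0rph/CryptoTools | crypto_tools.py | b_to_dec
-- ===== SOURCE A (Python) =====
-- def b_to_dec(n,bsym):
-- 	#invert the bsymbols
-- 	bsym_inv = {ch:i for i,ch in enumerate(bsym)}
--
-- 	rn = reversed(n)
-- 	res = 0
-- 	mult = 1
-- 	for ch in rn:
-- 		res += bsym_inv[ch]*mult
-- 		mult *= len(bsym)
--
-- 	return res
-- ===== SOURCE B (Python) =====
-- def b_to_dec(n, bsym):
--     # Horner's method: forward scan, no reversal and no power accumulator
--     bsym_inv = {ch: i for i, ch in enumerate(bsym)}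
--     res = 0
--     for ch in n:
--         res = res * len(bsym) + bsym_inv[ch]
--     return res
-- ===== Notes on version B (the rewrite author's own statement) =====
-- stated objective: simpler
-- what changed: Replaces the reversed scan with an explicit power multiplier by a forward Horner scan (res = res*base + digit), dropping reversed() and the mult variable.
import Mathlib
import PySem

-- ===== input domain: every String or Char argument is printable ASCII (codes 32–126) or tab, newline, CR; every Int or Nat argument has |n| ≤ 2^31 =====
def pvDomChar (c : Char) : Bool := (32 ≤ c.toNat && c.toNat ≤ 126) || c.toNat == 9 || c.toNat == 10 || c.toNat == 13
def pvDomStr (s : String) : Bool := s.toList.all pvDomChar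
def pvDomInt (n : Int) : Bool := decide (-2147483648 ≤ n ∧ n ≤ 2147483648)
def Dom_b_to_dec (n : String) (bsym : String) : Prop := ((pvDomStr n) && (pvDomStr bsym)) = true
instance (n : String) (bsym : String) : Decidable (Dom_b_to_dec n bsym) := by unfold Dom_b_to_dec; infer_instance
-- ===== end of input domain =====

-- B replaces A's reversed scan with a power multiplier by a forward Horner scan; objective: simpler.


-- ===== PORT A =====
-- shared helper: bsym_inv = {ch:i for i,ch in enumerate(bsym)} (identical line in Source A and Source B)
def pvInv (bsym : String) : PySem.Dict Char Int :=
  (PySem.List.enumerate bsym.toList).foldl (fun d p => d.insert p.2 p.1) PySem.Dict.empty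

-- literal port of A: loop over reversed(n) with (res, mult) state.
-- bsym_inv[ch] is getD … 0: Pre_ guarantees the key is present (Python raises KeyError otherwise).
def b_to_dec (n : String) (bsym : String) : Int :=
  (n.toList.reverse.foldl
    (fun (p : Int × Int) ch => (p.1 + (pvInv bsym).getD ch 0 * p.2, p.2 * PySem.Str.len bsym))
    (0, 1)).1

-- ===== PORT B =====
-- literal port of Source B: forward Horner scan.
def b_to_dec_alt (n : String) (bsym : String) : Int :=
  n.toList.foldl (fun r ch => r * PySem.Str.len bsym + (pvInv bsym).getD ch 0) 0

-- ===== PRECONDITION & SPEC =====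
-- Pre_ excludes exactly the inputs where Python's bsym_inv[ch] raises KeyError (a char of n not in bsym);
-- both A and B raise there.
def Pre_b_to_dec (n : String) (bsym : String) : Prop := n.toList.all (fun ch => bsym.toList.contains ch) = true
instance (n : String) (bsym : String) : Decidable (Pre_b_to_dec n bsym) := by unfold Pre_b_to_dec; infer_instance
def pvWitness_b_to_dec : String × String := ("101", "01")
def Spec_b_to_dec (n : String) (bsym : String) (out : Int) : Prop := out = b_to_dec_alt n bsym
instance (n : String) (bsym : String) (out : Int) : Decidable (Spec_b_to_dec n bsym out) := by unfold Spec_b_to_dec; infer_instance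

-- ===== CLAIM (what is proved, stated in full; the proofs are below) =====
def Claim_equal_b_to_dec : Prop := ∀ (n : String) (bsym : String), Dom_b_to_dec n bsym → Pre_b_to_dec n bsym → Spec_b_to_dec n bsym (b_to_dec n bsym)

-- ===== LEMMAS AND PROOFS =====

-- little-endian value of a digit list under digit map d and base b
def pvLE (d : Char → Int) (b : Int) : List Char → Int
  | [] => 0
  | c :: cs => d c + b * pvLE d b cs

theorem pvA_loop (d : Char → Int) (b : Int) :
    ∀ (l : List Char) (res mult : Int),
      (l.foldl (fun (p : Int × Int) ch => (p.1 + d ch * p.2, p.2 * b)) (res, mult)).1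
        = res + mult * pvLE d b l := by
  intro l
  induction l with
  | nil => intro res mult; simp [pvLE]
  | cons c cs ih =>
      intro res mult
      simp only [List.foldl_cons, pvLE]
      rw [ih]
      ring

theorem pvLE_append (d : Char → Int) (b : Int) (c : Char) :
    ∀ (xs : List Char), pvLE d b (xs ++ [c]) = pvLE d b xs + b ^ xs.length * d c := by
  intro xs
  induction xs with
  | nil => simp [pvLE]
  | cons x xt ih =>
      simp only [List.cons_append, pvLE, ih, List.length_cons]
      ring

theorem pvB_loop (d : Char → Int) (b : Int) :
    ∀ (l : List Char) (r : Int),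
      l.foldl (fun r ch => r * b + d ch) r = r * b ^ l.length + pvLE d b l.reverse := by
  intro l
  induction l with
  | nil => intro r; simp [pvLE]
  | cons c cs ih =>
      intro r
      simp only [List.foldl_cons, List.reverse_cons, List.length_cons]
      rw [ih, pvLE_append]
      simp only [List.length_reverse]
      ring

-- ===== VERDICT (by name: the statement is the Claim_ definition above) =====
theorem b_to_dec_spec : Claim_equal_b_to_dec := by
  intro n bsym _ _
  unfold Spec_b_to_dec b_to_dec b_to_dec_alt
  rw [pvA_loop, pvB_loop]
  simp
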